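-- pv_equiv track=rewrite | github.com/Asnor14/grammar-spellchecker-ngram | backend/app/api/grammar.py | limit_corrections
-- ===== SOURCE A (Python) =====
-- from typing import List, Dict, Optional
--
-- def limit_corrections(errors: List[Dict], word_count: int) -> List[Dict]:
--     if word_count == 0: return errors
--     punct = [e for e in errors if e['type'] == 'punctuation']
--     other = [e for e in errors if e['type'] != 'punctuation']
--
--     if word_count < 5: return other + punct
--
--     limit = max(1, int(word_count * 0.6))
--     priority = {'spelling': 0, 'grammar': 1, 'ngram': 2, 'semantic': 3, 'structure': 4, 'ai': 5}
--     other.sort(key=lambda x: priority.get(x['type'], 6))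
--
--     return other[:limit] + punct
-- ===== SOURCE B (Python) =====
-- from typing import List, Dict
--
-- def limit_corrections(errors: List[Dict], word_count: int) -> List[Dict]:
--     if word_count == 0: return errors
--     # single-pass partition instead of two filter passes
--     punct, other = [], []
--     for e in errors:
--         (punct if e['type'] == 'punctuation' else other).append(e)
--     if word_count < 5: return other + punct
--
--     limit = max(1, int(word_count * 0.6))
--     priority = {'spelling': 0, 'grammar': 1, 'ngram': 2, 'semantic': 3, 'structure': 4, 'ai': 5}
--     # bucket (counting) sort: 7 ordered buckets, appended in input order = stable
--     buckets = [[] for _ in range(7)]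
--     for e in other:
--         buckets[priority.get(e['type'], 6)].append(e)
--     ranked = [e for b in buckets for e in b]
--     return ranked[:limit] + punct
-- ===== Notes on version B (the rewrite author's own statement) =====
-- stated objective: alternative
-- what changed: Two filter passes are replaced by a single-pass partition, and the comparison sort by key is replaced by a 7-bucket counting sort (append into buckets in input order, then concatenate), which preserves stability and ties exactly.
import Mathlib
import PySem

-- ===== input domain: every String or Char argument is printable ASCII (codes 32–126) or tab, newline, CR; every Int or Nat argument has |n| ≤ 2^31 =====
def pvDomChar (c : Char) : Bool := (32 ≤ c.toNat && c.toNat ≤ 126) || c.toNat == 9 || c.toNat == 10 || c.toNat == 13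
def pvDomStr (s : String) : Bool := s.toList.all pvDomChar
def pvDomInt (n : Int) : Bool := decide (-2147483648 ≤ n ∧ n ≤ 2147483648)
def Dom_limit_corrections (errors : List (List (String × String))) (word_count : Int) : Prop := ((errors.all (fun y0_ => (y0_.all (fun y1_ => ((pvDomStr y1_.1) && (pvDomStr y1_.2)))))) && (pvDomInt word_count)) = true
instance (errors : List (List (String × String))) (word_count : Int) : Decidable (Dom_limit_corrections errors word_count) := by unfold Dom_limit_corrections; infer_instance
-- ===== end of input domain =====

-- B replaces A's two filter passes and comparison sort by a one-pass partition and a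
-- 7-bucket counting sort (alternative decomposition; equivalence is about the return value —
-- A sorts only a local list, the input is not mutated).

-- ===== PORT A =====
-- e['type']: first-match dict lookup; Pre_ guarantees the key exists, so the getD "" default is never reached
def pvType (e : List (String × String)) : String :=
  ((PySem.Dict.mk e).get? "type").getD ""

-- priority = {'spelling': 0, 'grammar': 1, 'ngram': 2, 'semantic': 3, 'structure': 4, 'ai': 5}
def pvPriority : PySem.Dict String Nat :=
  PySem.Dict.mk [("spelling", 0), ("grammar", 1), ("ngram", 2), ("semantic", 3), ("structure", 4), ("ai", 5)]

-- the sort key: priority.get(e['type'], 6)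
def pvKey (e : List (String × String)) : Nat := pvPriority.getD (pvType e) 6

def limit_corrections (errors : List (List (String × String))) (word_count : Int) : List (List (String × String)) :=
  if word_count == 0 then errors
  else
    let punct := errors.filter (fun e => pvType e == "punctuation")
    let other := errors.filter (fun e => !(pvType e == "punctuation"))
    if word_count < 5 then other ++ punct
    else
      -- int(word_count * 0.6): exact as (3*word_count)//5 for every 5 ≤ word_count ≤ 2^31
      -- (only such word_count reach this branch; the double rounding of word_count*0.6 never crosses an integer there)
      let limit : Int := max 1 (PySem.Int.floordiv (3 * word_count) 5)
      let sortedOther := PySem.List.sorted other (fun e => pvKey e) false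
      PySem.List.slice sortedOther none (some limit) ++ punct

-- ===== PORT B =====
def limit_corrections_alt (errors : List (List (String × String))) (word_count : Int) : List (List (String × String)) :=
  if word_count == 0 then errors
  else
    -- single pass: (punct, other) partition
    let po := errors.foldl
      (fun (acc : List (List (String × String)) × List (List (String × String))) e =>
        if pvType e == "punctuation" then (acc.1 ++ [e], acc.2) else (acc.1, acc.2 ++ [e]))
      ([], [])
    if word_count < 5 then po.2 ++ po.1
    else
      let limit : Int := max 1 (PySem.Int.floordiv (3 * word_count) 5)
      -- buckets[priority.get(e['type'], 6)].append(e); pvKey e ≤ 6, so List.set/getD index exactly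
      let buckets := po.2.foldl
        (fun (bs : List (List (List (String × String)))) e =>
          bs.set (pvKey e) ((bs.getD (pvKey e) []) ++ [e]))
        (List.replicate 7 [])
      let ranked := buckets.flatMap id
      PySem.List.slice ranked none (some limit) ++ po.1

-- ===== PRECONDITION & SPEC =====
-- Pre_ excludes exactly the inputs where Python A raises KeyError:
-- word_count ≠ 0 and some error dict lacks the 'type' key
def Pre_limit_corrections (errors : List (List (String × String))) (word_count : Int) : Prop :=
  word_count = 0 ∨ ∀ e ∈ errors, (((PySem.Dict.mk e).get? "type").isSome = true)
instance (errors : List (List (String × String))) (word_count : Int) : Decidable (Pre_limit_corrections errors word_count) := by unfold Pre_limit_corrections; infer_instance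

def pvWitness_limit_corrections : (List (List (String × String))) × Int :=
  ([[("type", "spelling")], [("type", "punctuation")], [("type", "grammar")]], 7)

def Spec_limit_corrections (errors : List (List (String × String))) (word_count : Int) (out : List (List (String × String))) : Prop := out = limit_corrections_alt errors word_count
instance (errors : List (List (String × String))) (word_count : Int) (out : List (List (String × String))) : Decidable (Spec_limit_corrections errors word_count out) := by unfold Spec_limit_corrections; infer_instance

-- ===== CLAIM (what is proved, stated in full; the proofs are below) =====
def Claim_equal_limit_corrections : Prop := ∀ (errors : List (List (String × String))) (word_count : Int), Dom_limit_corrections errors word_count → Pre_limit_corrections errors word_count → Spec_limit_corrections errors word_count (limit_corrections errors word_count)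

-- ===== LEMMAS AND PROOFS =====

lemma pvKey_le (e : List (String × String)) : pvKey e ≤ 6 := by
  unfold pvKey pvPriority
  simp [PySem.Dict.getD, PySem.Dict.get?, List.find?]
  repeat' split
  all_goals simp

lemma pv_partition (ys : List (List (String × String))) (p o : List (List (String × String))) :
    ys.foldl
      (fun (acc : List (List (String × String)) × List (List (String × String))) e =>
        if pvType e == "punctuation" then (acc.1 ++ [e], acc.2) else (acc.1, acc.2 ++ [e]))
      (p, o)
    = (p ++ ys.filter (fun e => pvType e == "punctuation"),
       o ++ ys.filter (fun e => !(pvType e == "punctuation"))) := by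
  induction ys generalizing p o with
  | nil => simp
  | cons x xs ih =>
    simp only [List.foldl_cons, List.filter_cons]
    by_cases h : (pvType x == "punctuation") = true
    · rw [if_pos h, ih]; simp [h]
    · rw [if_neg h, ih]; simp [h]

lemma pv_buckets (ys : List (List (String × String))) :
    ys.foldl
      (fun (bs : List (List (List (String × String)))) e =>
        bs.set (pvKey e) ((bs.getD (pvKey e) []) ++ [e]))
      (List.replicate 7 [])
    = (List.range 7).map (fun i => ys.filter (fun e => pvKey e == i)) := by
  induction ys using List.reverseRecOn with
  | nil =>
    apply List.ext_getElem (by simp)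
    intro i h1 h2
    simp at h1
    simp
  | append_singleton xs x ih =>
    rw [List.foldl_append, ih]
    simp only [List.foldl_cons, List.foldl_nil]
    have hk : pvKey x < 7 := Nat.lt_succ_of_le (pvKey_le x)
    have hget : (((List.range 7).map (fun i => xs.filter (fun e => pvKey e == i))).getD (pvKey x) [])
        = xs.filter (fun e => pvKey e == pvKey x) := by
      rw [List.getD_eq_getElem?_getD]
      simp [hk]
    rw [hget]
    apply List.ext_getElem (by simp)
    intro i h1 h2
    simp only [List.length_set, List.length_map, List.length_range] at h1
    rw [List.getElem_set]
    simp only [List.getElem_map, List.getElem_range, List.filter_append, List.filter_cons,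
      List.filter_nil]
    by_cases hik : i = pvKey x
    · simp [hik]
    · have hne : ¬ (pvKey x == i) = true := by simpa using fun hh => hik hh.symm
      simp only [if_neg (Ne.symm hik), hne]
      simp

lemma pv_insert_skip (before : List (String × String) → List (String × String) → Bool)
    (x : List (String × String)) (l r : List (List (String × String)))
    (h : ∀ e ∈ l, before x e = false) :
    PySem.List.insertBy before x (l ++ r) = l ++ PySem.List.insertBy before x r := by
  induction l with
  | nil => simp
  | cons y ys ih =>
    have hy : before x y = false := h y (by simp)
    simp only [List.cons_append, PySem.List.insertBy, hy, Bool.false_eq_true, if_false]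
    rw [ih (fun e he => h e (by simp [he]))]

lemma pv_insert_front (before : List (String × String) → List (String × String) → Bool)
    (x : List (String × String)) (l : List (List (String × String)))
    (h : ∀ e ∈ l, before x e = true) :
    PySem.List.insertBy before x l = x :: l := by
  cases l with
  | nil => rfl
  | cons y ys => simp [PySem.List.insertBy, h y (by simp)]

def pvBcat (ys : List (List (String × String))) : List (List (String × String)) :=
  (List.range 7).flatMap (fun i => ys.filter (fun e => pvKey e == i))

lemma pv_sorted_eq_bcat (ys : List (List (String × String))) :
    PySem.List.sorted ys (fun e => pvKey e) false = pvBcat ys := by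
  induction ys using List.reverseRecOn with
  | nil => simp [PySem.List.sorted, pvBcat]
  | append_singleton xs x ih =>
    have hsort : PySem.List.sorted (xs ++ [x]) (fun e => pvKey e) false
        = PySem.List.insertBy (fun a b => decide (pvKey a < pvKey b)) x
            (PySem.List.sorted xs (fun e => pvKey e) false) := by
      simp [PySem.List.sorted, List.foldl_append]
    have hk6 : pvKey x ≤ 6 := pvKey_le x
    have hsplit : List.range 7
        = List.range (pvKey x + 1) ++ (List.range (6 - pvKey x)).map (· + (pvKey x + 1)) := by
      have h7 : 7 = (pvKey x + 1) + (6 - pvKey x) := by omega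
      rw [h7, List.range_add]
      simp [Nat.add_comm]
    have hlo : ∀ e ∈ (List.range (pvKey x + 1)).flatMap
        (fun i => xs.filter (fun e => pvKey e == i)),
        (decide (pvKey x < pvKey e)) = false := by
      intro e he
      simp only [List.mem_flatMap, List.mem_range, List.mem_filter] at he
      obtain ⟨i, hi, _, hkey⟩ := he
      simp at hkey
      simp [hkey]
      omega
    have hhi : ∀ e ∈ ((List.range (6 - pvKey x)).map (· + (pvKey x + 1))).flatMap
        (fun i => xs.filter (fun e => pvKey e == i)),
        (decide (pvKey x < pvKey e)) = true := by
      intro e he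
      simp only [List.mem_flatMap, List.mem_map, List.mem_range, List.mem_filter] at he
      obtain ⟨i, ⟨j, hj, hji⟩, _, hkey⟩ := he
      simp at hkey
      simp [hkey, ← hji]
      omega
    have hfe : ∀ (i : Nat), (xs ++ [x]).filter (fun e => pvKey e == i)
        = xs.filter (fun e => pvKey e == i) ++ (if pvKey x = i then [x] else []) := by
      intro i
      simp only [List.filter_append, List.filter_cons, List.filter_nil]
      by_cases hik : pvKey x = i
      · simp [hik]
      · simp [hik]
    have hlo' : (List.range (pvKey x + 1)).flatMap
          (fun i => (xs ++ [x]).filter (fun e => pvKey e == i))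
        = (List.range (pvKey x + 1)).flatMap (fun i => xs.filter (fun e => pvKey e == i)) ++ [x] := by
      rw [List.range_succ, List.flatMap_append, List.flatMap_append,
        List.flatMap_congr (fun i hi => hfe i)]
      have : ∀ i ∈ List.range (pvKey x),
          xs.filter (fun e => pvKey e == i) ++ (if pvKey x = i then [x] else [])
          = xs.filter (fun e => pvKey e == i) := by
        intro i hi
        simp only [List.mem_range] at hi
        simp [Nat.ne_of_gt hi]
      rw [List.flatMap_congr this]
      simp
    have hhi' : ((List.range (6 - pvKey x)).map (· + (pvKey x + 1))).flatMap
          (fun i => (xs ++ [x]).filter (fun e => pvKey e == i))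
        = ((List.range (6 - pvKey x)).map (· + (pvKey x + 1))).flatMap
          (fun i => xs.filter (fun e => pvKey e == i)) := by
      apply List.flatMap_congr
      intro i hi
      simp only [List.mem_map, List.mem_range] at hi
      obtain ⟨j, hj, hji⟩ := hi
      rw [hfe i]
      have : ¬ pvKey x = i := by omega
      simp [this]
    rw [hsort, ih]
    unfold pvBcat
    rw [hsplit, List.flatMap_append, pv_insert_skip _ _ _ _ hlo, pv_insert_front _ _ _ hhi,
      List.flatMap_append, hlo', hhi']
    simp

-- ===== VERDICT (by name: the statement is the Claim_ definition above) =====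
theorem limit_corrections_spec : Claim_equal_limit_corrections := by
  intro errors word_count _ _
  unfold Spec_limit_corrections limit_corrections limit_corrections_alt
  by_cases h0 : word_count == 0
  · simp only [h0, if_true]
  · simp only [h0, Bool.false_eq_true, if_false, pv_partition, List.nil_append]
    by_cases h5 : word_count < 5
    · simp only [h5, if_true]
    · simp only [h5, if_false, pv_buckets, pv_sorted_eq_bcat, pvBcat]
      simp [List.flatMap_map]
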